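-- pv_equiv track=rewrite | github.com/Takuya248-bit/line-harness-oss | crowdsourcing-autopilot/scripts/register_utils.py | response_suggests_blocked
-- ===== SOURCE A (Python) =====
-- def response_suggests_blocked(title_or_snippet: str) -> bool:
--     t = title_or_snippet.lower()
--     return any(
--         x in t
--         for x in (
--             "challenge",
--             "attention required",
--             "just a moment",
--             "access denied",
--             "blocked",
--             "rate limit",
--         )
--     )
-- ===== SOURCE B (Python) =====
-- def response_suggests_blocked(title_or_snippet: str) -> bool:
--     t = title_or_snippet.lower()
--     kws = (
--         "challenge",
--         "attention required",
--         "just a moment",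
--         "access denied",
--         "blocked",
--         "rate limit",
--     )
--     # single left-to-right pass: at each position, test whether some keyword starts here
--     for i in range(len(t)):
--         for k in kws:
--             if t.startswith(k, i):
--                 return True
--     return False
-- ===== Notes on version B (the rewrite author's own statement) =====
-- stated objective: alternative
-- what changed: Replaces six independent substring scans ('x in t' per keyword) by one left-to-right pass over the text that tests at each position whether any keyword starts there (startswith anchored at the position).
import Mathlib
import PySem

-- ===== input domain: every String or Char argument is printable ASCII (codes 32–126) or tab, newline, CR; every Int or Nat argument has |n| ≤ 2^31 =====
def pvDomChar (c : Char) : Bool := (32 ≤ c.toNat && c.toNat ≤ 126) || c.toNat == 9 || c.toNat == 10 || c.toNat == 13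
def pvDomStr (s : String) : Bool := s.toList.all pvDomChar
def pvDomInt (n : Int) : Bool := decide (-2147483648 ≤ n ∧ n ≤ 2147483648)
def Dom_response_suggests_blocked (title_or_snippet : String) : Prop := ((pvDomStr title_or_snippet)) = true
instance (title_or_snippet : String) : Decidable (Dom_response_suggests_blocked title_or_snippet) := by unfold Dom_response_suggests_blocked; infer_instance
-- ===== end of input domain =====

-- B replaces A's six independent substring scans by one left-to-right pass testing each keyword anchored at every position (alternative structure, same result).


-- ===== PORT A =====
-- Port of A: lowercase, then 'any' of six membership tests, in source order.
def response_suggests_blocked (title_or_snippet : String) : Bool :=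
  let t := PySem.Str.lower title_or_snippet
  (["challenge", "attention required", "just a moment", "access denied",
    "blocked", "rate limit"] : List String).any (fun x => PySem.Str.isIn x t)

-- ===== PORT B =====
-- Port of B: one left-to-right pass over the lowered text; at each position test
-- whether some keyword starts there (Python's t.startswith(k, i) on suffixes).
def pvBlockedKeywords : List (List Char) :=
  ["challenge".toList, "attention required".toList, "just a moment".toList,
   "access denied".toList, "blocked".toList, "rate limit".toList]

def pvScan (kws : List (List Char)) : List Char → Bool
  | [] => false
  | c :: rest =>
      if kws.any (fun k => List.isPrefixOf k (c :: rest)) then true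
      else pvScan kws rest

def response_suggests_blocked_alt (title_or_snippet : String) : Bool :=
  pvScan pvBlockedKeywords (PySem.Chars.lower title_or_snippet.toList)

-- ===== PRECONDITION & SPEC =====
def Spec_response_suggests_blocked (title_or_snippet : String) (out : Bool) : Prop := out = response_suggests_blocked_alt title_or_snippet
instance (title_or_snippet : String) (out : Bool) : Decidable (Spec_response_suggests_blocked title_or_snippet out) := by unfold Spec_response_suggests_blocked; infer_instance

-- ===== CLAIM (what is proved, stated in full; the proofs are below) =====
def Claim_equal_response_suggests_blocked : Prop := ∀ (title_or_snippet : String), Dom_response_suggests_blocked title_or_snippet → Spec_response_suggests_blocked title_or_snippet (response_suggests_blocked title_or_snippet)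

-- ===== LEMMAS AND PROOFS =====

lemma pvIsIn_cons (k : List Char) (c : Char) (rest : List Char) :
    PySem.Chars.isIn k (c :: rest) =
      (List.isPrefixOf k (c :: rest) || PySem.Chars.isIn k rest) := by
  by_cases h : k <:+: (c :: rest)
  · have e1 : PySem.Chars.isIn k (c :: rest) = true := (PySem.Chars.isIn_iff_infix _ _).mpr h
    rcases List.infix_cons_iff.mp h with hpre | hinf
    · simp [e1, List.isPrefixOf_iff_prefix.mpr hpre]
    · simp [e1, (PySem.Chars.isIn_iff_infix _ _).mpr hinf]
  · have e1 : PySem.Chars.isIn k (c :: rest) = false := (PySem.Chars.isIn_eq_false_iff _ _).mpr h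
    have e2 : PySem.Chars.isIn k rest = false :=
      (PySem.Chars.isIn_eq_false_iff _ _).mpr (fun hi => h (List.infix_cons_iff.mpr (Or.inr hi)))
    have e3 : List.isPrefixOf k (c :: rest) = false := by
      rw [Bool.eq_false_iff]
      intro hp
      exact h (List.isPrefixOf_iff_prefix.mp hp).isInfix
    simp [e1, e2, e3]

lemma pvAny_or {α : Type} (l : List α) (f g : α → Bool) :
    l.any (fun x => f x || g x) = (l.any f || l.any g) := by
  induction l with
  | nil => rfl
  | cons a l ih => simp [List.any_cons, ih, Bool.or_assoc, Bool.or_left_comm]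

lemma pvScan_eq_any_isIn (kws : List (List Char)) (h : ∀ k ∈ kws, k ≠ []) :
    ∀ t : List Char, pvScan kws t = kws.any (fun k => PySem.Chars.isIn k t) := by
  intro t
  induction t with
  | nil =>
      simp only [pvScan]
      symm
      simp only [List.any_eq_false]
      intro k hk
      simp [PySem.Chars.isIn_eq_false_iff, List.infix_nil, h k hk]
  | cons c rest ih =>
      simp only [pvScan, ih, pvIsIn_cons, pvAny_or]
      cases hp : kws.any (fun k => List.isPrefixOf k (c :: rest)) with
      | true => simp
      | false => simp

-- ===== VERDICT (by name: the statement is the Claim_ definition above) =====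
theorem response_suggests_blocked_spec : Claim_equal_response_suggests_blocked := by
  unfold Claim_equal_response_suggests_blocked
  intro s _
  unfold Spec_response_suggests_blocked
  unfold response_suggests_blocked response_suggests_blocked_alt
  rw [pvScan_eq_any_isIn pvBlockedKeywords (by decide)]
  simp [pvBlockedKeywords, PySem.Str.isIn, PySem.Str.lower, List.any]
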